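-- pv_equiv track=rewrite | github.com/Inaki1210/LEPL1401_perso | CM4-TP4-M4/TP4_carre.py | carre
-- ===== SOURCE A (Python) =====
-- def carre(n):
--     l=[]
--     for i in range(n):
--         l.append([])
--         for j in range(n):
--             k = i*n+j
--             l[i].append(k)
--     return l
-- ===== SOURCE B (Python) =====
-- def carre(n):
--     if n <= 0:
--         return []
--     flat = list(range(n * n))
--     return [flat[i * n:(i + 1) * n] for i in range(n)]
-- ===== Notes on version B (the rewrite author's own statement) =====
-- stated objective: alternative
-- what changed: B builds the flat value sequence 0..n*n-1 once with range(n*n) and reshapes it by slicing into n consecutive blocks, instead of A's nested loops recomputing i*n+j cell by cell with in-place appends.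
import Mathlib
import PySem

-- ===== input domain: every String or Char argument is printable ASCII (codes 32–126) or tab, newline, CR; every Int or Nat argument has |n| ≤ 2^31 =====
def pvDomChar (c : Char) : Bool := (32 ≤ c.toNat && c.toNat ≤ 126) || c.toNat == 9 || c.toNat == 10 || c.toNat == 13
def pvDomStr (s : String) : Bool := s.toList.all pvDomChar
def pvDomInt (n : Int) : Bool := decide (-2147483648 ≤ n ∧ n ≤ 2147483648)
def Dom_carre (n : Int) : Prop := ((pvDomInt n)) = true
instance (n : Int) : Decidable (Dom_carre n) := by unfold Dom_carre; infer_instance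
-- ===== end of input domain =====

-- B builds the flat sequence range(n*n) once and reshapes it by slicing into n blocks, instead of A's nested cell-by-cell loops (alternative decomposition, same cost).


-- ===== PORT A =====
-- A: outer loop appends a fresh row, inner loop appends i*n+j to it.
def carre (n : Int) : List (List Int) :=
  (PySem.List.pyRange 0 n 1).foldl
    (fun l i =>
      l ++ [(PySem.List.pyRange 0 n 1).foldl (fun r j => r ++ [i * n + j]) []])
    []

-- ===== PORT B =====
-- B: flat = range(n*n); row i is the slice flat[i*n:(i+1)*n].
def carre_alt (n : Int) : List (List Int) :=
  if n ≤ 0 then []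
  else
    let flat := PySem.List.pyRange 0 (n * n) 1
    (PySem.List.pyRange 0 n 1).map
      (fun i => PySem.List.slice flat (some (i * n)) (some ((i + 1) * n)))

-- ===== PRECONDITION & SPEC =====
def Spec_carre (n : Int) (out : List (List Int)) : Prop := out = carre_alt n
instance (n : Int) (out : List (List Int)) : Decidable (Spec_carre n out) := by unfold Spec_carre; infer_instance

-- ===== CLAIM (what is proved, stated in full; the proofs are below) =====
def Claim_equal_carre : Prop := ∀ (n : Int), Dom_carre n → Spec_carre n (carre n)

-- ===== LEMMAS AND PROOFS =====

theorem foldl_push {α β : Type} (f : α → β) :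
    ∀ (xs : List α) (init : List β),
      xs.foldl (fun l i => l ++ [f i]) init = init ++ xs.map f := by
  intro xs
  induction xs with
  | nil => simp
  | cons x xs ih => intro init; simp [List.foldl_cons, ih]

theorem slice_chunk (n i : Int) (h0 : 0 ≤ i) (h1 : i < n) :
    PySem.List.slice (PySem.List.pyRange 0 (n * n) 1) (some (i * n)) (some ((i + 1) * n))
      = PySem.List.pyRange (i * n) ((i + 1) * n) 1 := by
  have hn : 0 < n := lt_of_le_of_lt h0 h1
  have ha : (0 : Int) ≤ i * n := mul_nonneg h0 hn.le
  have hb : i * n ≤ (i + 1) * n := by nlinarith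
  have hc : (i + 1) * n ≤ n * n := by nlinarith
  rw [PySem.List.slice_toNat _ ha (le_trans ha hb)]
  rw [PySem.List.pyRange_one_append 0 (i * n) (n * n) ha (le_trans hb hc)]
  rw [List.drop_left' (by simp [PySem.List.length_pyRange_one])]
  rw [PySem.List.pyRange_one_append (i * n) ((i + 1) * n) (n * n) hb hc]
  rw [List.take_left' (by simp [PySem.List.length_pyRange_one] ; omega)]

theorem row_eq (n i : Int) :
    PySem.List.pyRange (i * n) ((i + 1) * n) 1
      = (PySem.List.pyRange 0 n 1).map (fun j => i * n + j) := by
  rw [PySem.List.pyRange_one, PySem.List.pyRange_one]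
  rw [show (i + 1) * n - i * n = n - 0 by ring]
  simp [List.map_map, Function.comp]

-- ===== VERDICT (by name: the statement is the Claim_ definition above) =====
theorem carre_spec : Claim_equal_carre := by
  intro n _
  unfold Spec_carre carre carre_alt
  by_cases hn : n ≤ 0
  · simp [hn, PySem.List.pyRange_one_eq_nil hn]
  simp only [hn, if_false]
  rw [foldl_push]
  simp only [List.nil_append]
  apply List.map_congr_left
  intro i hi
  rw [PySem.List.mem_pyRange_one] at hi
  rw [slice_chunk n i hi.1 hi.2, row_eq, foldl_push, List.nil_append]
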